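-- pv_equiv track=rewrite | github.com/asarandi/kami2-solver | analyze.py | get_groups_and_color_counts
-- ===== SOURCE A (Python) =====
-- def get_groups_and_color_counts(board, all_groups):
--     counts = {}
--     for current_group in all_groups:
--         color = board[current_group[0]]
--         if color not in counts:
--             counts[color] = 0
--         counts[color] += 1
--     result = {}
--     for current_group in all_groups:
--         color = board[current_group[0]]
--         result[tuple(current_group)] = counts[color]
--     return result
-- ===== SOURCE B (Python) =====
-- def get_groups_and_color_counts(board, all_groups):
--     # Single pass: keep per-color buckets of group tuples; when a group arrives,
--     # append it to its color's bucket and retroactively set every member of that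
--     # bucket to the bucket's current size. The last group of each color leaves
--     # the final (total) count on all its groups; insertion order of `result`
--     # is first-occurrence order, exactly as in A.
--     buckets = {}
--     result = {}
--     for current_group in all_groups:
--         bucket = buckets.setdefault(board[current_group[0]], [])
--         bucket.append(tuple(current_group))
--         n = len(bucket)
--         for member in bucket:
--             result[member] = n
--     return result
-- ===== Notes on version B (the rewrite author's own statement) =====
-- stated objective: alternative
-- what changed: Replaces A's two staged passes (count colors, then map every group to its color's count) by a single online pass that keeps per-color buckets of group tuples and retroactively overwrites every member of a bucket with the bucket's current size, so no separate counting pass or final count is ever needed.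
import Mathlib
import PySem

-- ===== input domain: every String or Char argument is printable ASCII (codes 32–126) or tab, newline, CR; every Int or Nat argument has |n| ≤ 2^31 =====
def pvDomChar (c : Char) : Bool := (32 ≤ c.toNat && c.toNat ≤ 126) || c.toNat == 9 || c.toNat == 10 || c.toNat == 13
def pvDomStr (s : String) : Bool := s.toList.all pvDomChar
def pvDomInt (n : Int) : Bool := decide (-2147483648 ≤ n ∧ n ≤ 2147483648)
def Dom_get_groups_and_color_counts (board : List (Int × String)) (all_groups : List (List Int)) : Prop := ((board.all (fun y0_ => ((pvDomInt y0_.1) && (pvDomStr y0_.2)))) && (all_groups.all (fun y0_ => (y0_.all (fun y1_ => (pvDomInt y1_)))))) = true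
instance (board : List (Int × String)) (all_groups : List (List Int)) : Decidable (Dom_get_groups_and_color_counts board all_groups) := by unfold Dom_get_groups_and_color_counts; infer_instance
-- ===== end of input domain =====

-- B replaces A's two staged passes (count colors, then map groups to counts) by a single
-- online pass with per-color buckets whose members are retroactively overwritten with the
-- bucket's current size; the last group of a color leaves the final count everywhere.

-- shared helper: board[g[0]] (dict lookup of the group's first cell; total via defaults,
-- Pre_ restricts to inputs where Python does not raise)
def pvColor (board : List (Int × String)) (g : List Int) : String :=
  (PySem.Dict.mk board).getD (PySem.List.pyGetD g 0 0) ""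

-- ===== PORT A =====
def get_groups_and_color_counts (board : List (Int × String)) (all_groups : List (List Int)) : List (List Int × Int) :=
  let counts : PySem.Dict String Int :=
    all_groups.foldl (fun c g =>
      let color := pvColor board g
      let c := if c.contains color then c else c.insert color 0
      c.insert color (c.getD color 0 + 1)) PySem.Dict.empty
  let result : PySem.Dict (List Int) Int :=
    all_groups.foldl (fun r g =>
      let color := pvColor board g
      r.insert g (counts.getD color 0)) PySem.Dict.empty
  result.items

-- ===== PORT B =====
-- one iteration of B's single pass over all_groups
def pvStepB (board : List (Int × String))
    (st : PySem.Dict String (List (List Int)) × PySem.Dict (List Int) Int)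
    (g : List Int) : PySem.Dict String (List (List Int)) × PySem.Dict (List Int) Int :=
  let color := pvColor board g
  let bucket := st.1.getD color [] ++ [g]
  let n : Int := bucket.length
  (st.1.insert color bucket, bucket.foldl (fun r member => r.insert member n) st.2)

def get_groups_and_color_counts_alt (board : List (Int × String)) (all_groups : List (List Int)) : List (List Int × Int) :=
  (all_groups.foldl (pvStepB board) (PySem.Dict.empty, PySem.Dict.empty)).2.items

-- ===== PRECONDITION & SPEC =====
-- Pre_ excludes exactly the inputs where Python A raises: an empty group (IndexError on
-- group[0]) or a group whose first cell is not a key of the board dict (KeyError).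
def Pre_get_groups_and_color_counts (board : List (Int × String)) (all_groups : List (List Int)) : Prop :=
  all_groups.all (fun g => (!g.isEmpty) && (PySem.Dict.mk board).contains (g.headD 0)) = true
instance (board : List (Int × String)) (all_groups : List (List Int)) : Decidable (Pre_get_groups_and_color_counts board all_groups) := by unfold Pre_get_groups_and_color_counts; infer_instance
def pvWitness_get_groups_and_color_counts : (List (Int × String)) × List (List Int) :=
  ([(0, "r"), (1, "g")], [[0], [1], [0, 1]])

def Spec_get_groups_and_color_counts (board : List (Int × String)) (all_groups : List (List Int)) (out : List (List Int × Int)) : Prop := out = get_groups_and_color_counts_alt board all_groups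
instance (board : List (Int × String)) (all_groups : List (List Int)) (out : List (List Int × Int)) : Decidable (Spec_get_groups_and_color_counts board all_groups out) := by unfold Spec_get_groups_and_color_counts; infer_instance

-- ===== CLAIM (what is proved, stated in full; the proofs are below) =====
def Claim_equal_get_groups_and_color_counts : Prop := ∀ (board : List (Int × String)) (all_groups : List (List Int)), Dom_get_groups_and_color_counts board all_groups → Pre_get_groups_and_color_counts board all_groups → Spec_get_groups_and_color_counts board all_groups (get_groups_and_color_counts board all_groups)

-- ===== LEMMAS AND PROOFS =====

-- one iteration of A's counting loop, seen through getD
theorem stepA_getD (d : PySem.Dict String Int) (k v : String) :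
    ((if d.contains k then d else d.insert k 0).insert k
        ((if d.contains k then d else d.insert k 0).getD k 0 + 1)).getD v 0
      = if v = k then d.getD k 0 + 1 else d.getD v 0 := by
  by_cases hc : d.contains k
  · simp [hc, PySem.Dict.getD_insert]
  · simp only [hc, if_false, Bool.false_eq_true, PySem.Dict.getD_insert]
    have h0 : d.getD k 0 = 0 := PySem.Dict.getD_of_not_contains _ _ (by simpa using hc)
    split_ifs with hv <;> simp [h0]

-- A's first loop computes, at any key v, the number of groups whose color is v.
theorem countsA_getD (key : List Int → String) (l : List (List Int))
    (d : PySem.Dict String Int) (v : String) :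
    (l.foldl (fun c g =>
        let color := key g
        let c := if c.contains color then c else c.insert color 0
        c.insert color (c.getD color 0 + 1)) d).getD v 0
      = d.getD v 0 + ((l.map key).count v : Int) := by
  induction l generalizing d with
  | nil => simp
  | cons a t ih =>
    simp only [List.foldl_cons, List.map_cons]
    rw [ih, stepA_getD, List.count_cons]
    by_cases hv : v = key a
    · simp only [hv, BEq.rfl, if_true]
      push_cast; ring
    · simp [hv, Ne.symm hv]

-- lookup through a fold of inserts whose value depends only on the inserted key
theorem get?_foldl_insert_val (v : List Int → Int) (l : List (List Int))
    (d : PySem.Dict (List Int) Int) (x : List Int) :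
    (l.foldl (fun r g => r.insert g (v g)) d).get? x
      = if x ∈ l then some (v x) else d.get? x := by
  induction l generalizing d with
  | nil => simp
  | cons a t ih =>
    simp only [List.foldl_cons, ih, List.mem_cons]
    by_cases ht : x ∈ t
    · simp [ht]
    · by_cases ha : x = a
      · simp [ha, PySem.Dict.get?_insert_self]
      · simp [ht, ha, PySem.Dict.get?_insert_of_ne (hne := ha)]

-- B's invariant after any prefix l of the input: the buckets hold exactly the groups of each
-- color in order, and result maps each seen group to the count (so far) of its color.
theorem bInv (board : List (Int × String)) (l : List (List Int)) :
    (∀ c, ((l.foldl (pvStepB board) (PySem.Dict.empty, PySem.Dict.empty)).1.getD c []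
            = l.filter (fun g => pvColor board g == c)))
    ∧ (∀ x, ((l.foldl (pvStepB board) (PySem.Dict.empty, PySem.Dict.empty)).2.get? x
            = if x ∈ l then some (((l.map (pvColor board)).count (pvColor board x) : Int))
              else none))
    ∧ ((l.foldl (pvStepB board) (PySem.Dict.empty, PySem.Dict.empty)).2.keys
        = PySem.Set.ofList l) := by
  induction l using List.reverseRecOn with
  | nil => exact ⟨by simp, by simp, by simp⟩
  | append_singleton t g ih =>
    obtain ⟨ih1, ih2, ih3⟩ := ih
    rw [List.foldl_append]
    set S := t.foldl (pvStepB board) (PySem.Dict.empty, PySem.Dict.empty) with hS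
    simp only [List.foldl_cons, List.foldl_nil]
    unfold pvStepB
    set c0 := pvColor board g with hc0
    simp only [ih1]
    have hcount : ∀ s : String, (t.map (pvColor board)).count s
        = (t.filter (fun h => pvColor board h == s)).length := by
      intro s
      rw [List.count_eq_countP, List.countP_map, List.countP_eq_length_filter]
      rfl
    refine ⟨?_, ?_, ?_⟩
    · intro c
      rw [PySem.Dict.getD_insert]
      by_cases hc : c = c0
      · rw [if_pos hc, hc, List.filter_append]
        simp [← hc0]
      · rw [if_neg hc, ih1, List.filter_append]
        have hgc : (c0 == c) = false := beq_eq_false_iff_ne.mpr (fun h => hc h.symm)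
        simp [← hc0, hgc]
    · intro x
      rw [get?_foldl_insert_val]
      have hcnt : ∀ s : String, ((t ++ [g]).map (pvColor board)).count s
          = (t.map (pvColor board)).count s + (if c0 == s then 1 else 0) := by
        intro s
        simp [List.count_append, List.count_singleton, ← hc0]
      by_cases hx : x ∈ t.filter (fun h => pvColor board h == c0) ++ [g]
      · have hxc : pvColor board x = c0 := by
          rcases List.mem_append.mp hx with h | h
          · simpa using List.of_mem_filter h
          · rw [List.mem_singleton.mp h, ← hc0]
        have hxm : x ∈ t ++ [g] := by
          rcases List.mem_append.mp hx with h | h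
          · exact List.mem_append.mpr (Or.inl (List.mem_of_mem_filter h))
          · exact List.mem_append.mpr (Or.inr h)
        rw [if_pos hx, if_pos hxm, hxc, hcnt, if_pos (by simp), hcount]
        simp
      · have hxg : x ≠ g := fun h => hx (List.mem_append.mpr (Or.inr (by simp [h])))
        rw [if_neg hx, ih2]
        by_cases hxt : x ∈ t
        · have hxc : (c0 == pvColor board x) = false := by
            refine beq_eq_false_iff_ne.mpr (fun h => hx ?_)
            exact List.mem_append.mpr (Or.inl (List.mem_filter.mpr ⟨hxt, by simp [← h]⟩))
          rw [if_pos hxt, if_pos (List.mem_append.mpr (Or.inl hxt)), hcnt, if_neg (by simp [hxc])]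
          simp
        · rw [if_neg hxt, if_neg (by simp [hxt, hxg])]
    · rw [PySem.Dict.keys_foldl_insert, ih3, PySem.Set.update_append]
      have h1 : PySem.Set.update (PySem.Set.ofList t) (t.filter (fun h => pvColor board h == c0))
          = PySem.Set.ofList t := by
        rw [PySem.Set.update_eq_append_filter]
        have h0 : (PySem.Set.ofList (t.filter (fun h => pvColor board h == c0))).filter
            (fun y => !(PySem.Set.contains (PySem.Set.ofList t) y)) = [] := by
          rw [List.filter_eq_nil_iff]
          intro a ha
          have hat : a ∈ t := List.mem_of_mem_filter ((PySem.Set.mem_ofList _ _).mp ha)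
          simpa using (PySem.Set.mem_ofList _ _).mpr hat
        rw [h0, List.append_nil]
      rw [h1, PySem.Set.ofList_append_singleton]
      rfl

-- the two ports compute the same items list
theorem ports_eq (board : List (Int × String)) (l : List (List Int)) :
    get_groups_and_color_counts board l = get_groups_and_color_counts_alt board l := by
  obtain ⟨h1, h2, h3⟩ := bInv board l
  unfold get_groups_and_color_counts get_groups_and_color_counts_alt
  simp only []
  set key := pvColor board with hkey
  set counts := l.foldl (fun c g =>
      let color := pvColor board g
      let c := if c.contains color then c else c.insert color 0
      c.insert color (c.getD color 0 + 1)) (PySem.Dict.empty : PySem.Dict String Int) with hcounts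
  set dA := l.foldl (fun r g => r.insert g (counts.getD (pvColor board g) 0))
      (PySem.Dict.empty : PySem.Dict (List Int) Int) with hdA
  set dB := (l.foldl (pvStepB board) (PySem.Dict.empty, PySem.Dict.empty)).2 with hdB
  have hKA : dA.keys = PySem.Set.ofList l := by
    rw [hdA, PySem.Dict.keys_foldl_insert (f := fun d x => counts.getD (pvColor board x) 0)]
    simp [PySem.Set.update_nil_left]
  rw [PySem.Dict.items_eq_map_keys dA (by rw [hKA]; exact PySem.Set.nodup_ofList _) 0,
      PySem.Dict.items_eq_map_keys dB (by rw [h3]; exact PySem.Set.nodup_ofList _) 0,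
      hKA, h3]
  apply List.map_congr_left
  intro k hk
  have hkl : k ∈ l := (PySem.Set.mem_ofList _ _).mp hk
  have hgA : dA.get? k = some (counts.getD (pvColor board k) 0) := by
    rw [hdA, get?_foldl_insert_val (v := fun g => counts.getD (pvColor board g) 0), if_pos hkl]
  have hgB : dB.get? k = some (((l.map (pvColor board)).count (pvColor board k) : Int)) := by
    rw [hdB, h2, if_pos hkl]
  have hcv : counts.getD (pvColor board k) 0 = ((l.map (pvColor board)).count (pvColor board k) : Int) := by
    rw [hcounts, countsA_getD (key := pvColor board), PySem.Dict.getD_empty]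
    ring
  congr 1
  rw [PySem.Dict.getD_eq_get?_getD, PySem.Dict.getD_eq_get?_getD, hgA, hgB, hcv]

-- ===== VERDICT (by name: the statement is the Claim_ definition above) =====
theorem get_groups_and_color_counts_spec : Claim_equal_get_groups_and_color_counts := by
  intro board l _ _
  exact ports_eq board l
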